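-- pv_equiv track=rewrite | github.com/sysox/nearest_neighbour | simplest_and_sort.py | NN_stats
-- ===== SOURCE A (Python) =====
-- from collections import defaultdict, namedtuple
--
-- def masked_histogram(vectors: list[int], mask: int) -> dict[int, list[int]]:
--     """
--     Groups vectors into a dictionary based on their masked value.
--
--     Args:
--         vectors (list[int]): A list of integers to be grouped.
--         mask (int): The bitmask to apply to each integer.
--
--     Returns:
--         dict[int, list[int]]: A dictionary where keys are the result of
--                               (vector & mask) and values are lists of the
--                               original vectors that produced that key.
--     """
--     # Use a defaultdict(list) to automatically handle the creation of
--     # new lists for unseen keys. This is clean and efficient.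
--     histogram = defaultdict(list)
--     for vec in vectors:
--         key = vec & mask
--         histogram[key].append(vec)
--     return histogram
--
-- def NN_stats(L, R, mask):
--     L_hashes = masked_histogram(L, mask)
--     R_hashes = masked_histogram(R, mask)
--
--     common_keys = set(L_hashes.keys()) & set(R_hashes.keys())
--     complexity = 0
--     for key in common_keys:
--         complexity += len(L_hashes[key]) * len(R_hashes[key])
--
--     if (L[-1] & mask) != (R[-1] & mask):
--         complexity = -complexity
--     return complexity
-- ===== SOURCE B (Python) =====
-- def NN_stats(L, R, mask):
--     cnt = {}
--     for x in L:
--         k = x & mask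
--         cnt[k] = cnt.get(k, 0) + 1
--     complexity = 0
--     for r in R:
--         complexity += cnt.get(r & mask, 0)
--     if (L[-1] & mask) != (R[-1] & mask):
--         complexity = -complexity
--     return complexity
-- ===== Notes on version B (the rewrite author's own statement) =====
-- stated objective: simpler
-- what changed: B builds one histogram (of L's masked keys) instead of two, then accumulates the sum directly in a single pass over R's elements, removing the second histogram and the key-set intersection loop entirely.
import Mathlib
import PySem

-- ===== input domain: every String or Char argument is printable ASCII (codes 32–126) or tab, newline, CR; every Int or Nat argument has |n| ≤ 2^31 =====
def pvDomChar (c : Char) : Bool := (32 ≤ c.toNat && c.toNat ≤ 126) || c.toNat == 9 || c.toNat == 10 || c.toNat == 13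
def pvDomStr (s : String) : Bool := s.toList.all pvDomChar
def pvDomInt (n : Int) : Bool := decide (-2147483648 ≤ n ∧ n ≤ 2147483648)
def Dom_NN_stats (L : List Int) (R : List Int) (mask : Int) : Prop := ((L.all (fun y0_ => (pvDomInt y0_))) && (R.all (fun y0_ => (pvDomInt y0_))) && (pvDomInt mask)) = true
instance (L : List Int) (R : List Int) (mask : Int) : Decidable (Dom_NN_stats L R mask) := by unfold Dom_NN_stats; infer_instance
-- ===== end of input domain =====

-- B builds one histogram (of L's masked keys) instead of two, then accumulates the sum in a
-- single pass over R's elements, with no second histogram and no key-set intersection (simpler).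

-- ===== PORT A =====
def maskedHistogram (vectors : List Int) (mask : Int) : PySem.Dict Int (List Int) :=
  vectors.foldl (fun d vec => d.modify (PySem.Int.band vec mask) [] (· ++ [vec])) PySem.Dict.empty

def NN_stats (L : List Int) (R : List Int) (mask : Int) : Int :=
  let Lh := maskedHistogram L mask
  let Rh := maskedHistogram R mask
  let commonKeys := PySem.Set.inter (PySem.Set.ofList Lh.keys) (PySem.Set.ofList Rh.keys)
  let complexity := commonKeys.foldl
    (fun c key => c + ((Lh.getD key []).length : Int) * ((Rh.getD key []).length : Int)) 0
  if PySem.Int.band (PySem.List.pyGetD L (-1) 0) mask ≠ PySem.Int.band (PySem.List.pyGetD R (-1) 0) mask then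
    -complexity
  else
    complexity

-- ===== PORT B =====
def NN_stats_alt (L : List Int) (R : List Int) (mask : Int) : Int :=
  let cnt := L.foldl (fun d x => d.insert (PySem.Int.band x mask) (d.getD (PySem.Int.band x mask) 0 + 1)) PySem.Dict.empty
  let complexity := R.foldl (fun c r => c + cnt.getD (PySem.Int.band r mask) 0) 0
  if PySem.Int.band (PySem.List.pyGetD L (-1) 0) mask ≠ PySem.Int.band (PySem.List.pyGetD R (-1) 0) mask then
    -complexity
  else
    complexity

-- ===== PRECONDITION & SPEC =====
-- Pre_ excludes empty L or R, on which both Pythons raise IndexError at L[-1]/R[-1].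
def Pre_NN_stats (L : List Int) (R : List Int) (mask : Int) : Prop := L ≠ [] ∧ R ≠ []
instance (L : List Int) (R : List Int) (mask : Int) : Decidable (Pre_NN_stats L R mask) := by unfold Pre_NN_stats; infer_instance

def pvWitness_NN_stats : List Int × List Int × Int := ([3, 5, 7], [1, 7], 6)

def Spec_NN_stats (L : List Int) (R : List Int) (mask : Int) (out : Int) : Prop := out = NN_stats_alt L R mask
instance (L : List Int) (R : List Int) (mask : Int) (out : Int) : Decidable (Spec_NN_stats L R mask out) := by unfold Spec_NN_stats; infer_instance

-- ===== CLAIM (what is proved, stated in full; the proofs are below) =====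
def Claim_equal_NN_stats : Prop := ∀ (L : List Int) (R : List Int) (mask : Int), Dom_NN_stats L R mask → Pre_NN_stats L R mask → Spec_NN_stats L R mask (NN_stats L R mask)

-- ===== LEMMAS AND PROOFS =====

-- A's defaultdict(list) histogram looks up to the filter of its input by key
theorem hist_getD (l : List Int) (mask k : Int) (d : PySem.Dict Int (List Int)) :
    (l.foldl (fun d vec => d.modify (PySem.Int.band vec mask) [] (· ++ [vec])) d).getD k []
      = d.getD k [] ++ l.filter (fun x => PySem.Int.band x mask == k) := by
  induction l generalizing d with
  | nil => simp
  | cons x t ih =>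
    simp only [List.foldl_cons, ih]
    by_cases h : PySem.Int.band x mask = k
    · simp [h]
    · simp [PySem.Dict.getD_modify, Ne.symm h, h]

theorem hist_keys (l : List Int) (mask : Int) :
    (maskedHistogram l mask).keys = PySem.Set.ofList (l.map (fun x => PySem.Int.band x mask)) := by
  unfold maskedHistogram
  rw [PySem.Dict.keys_foldl_modify_key l (fun x => PySem.Int.band x mask) [] (fun d x v => v ++ [x])]
  rfl

-- the two accumulations (A: product over the key-set intersection; B: one pass over R) agree
theorem sums_eq (L R : List Int) (mask : Int) :
    (PySem.Set.inter (PySem.Set.ofList (maskedHistogram L mask).keys)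
        (PySem.Set.ofList (maskedHistogram R mask).keys)).foldl
      (fun c key => c + (((maskedHistogram L mask).getD key []).length : Int)
          * (((maskedHistogram R mask).getD key []).length : Int)) 0
    = R.foldl (fun c r =>
        c + (L.foldl (fun d x => d.insert (PySem.Int.band x mask) (d.getD (PySem.Int.band x mask) 0 + 1))
              PySem.Dict.empty).getD (PySem.Int.band r mask) 0) 0 := by
  set key : Int → Int := fun x => PySem.Int.band x mask with hkey
  set LK := L.map key with hLK
  set RK := R.map key with hRK
  have hcnt : ∀ m : Int,
      (L.foldl (fun d x => d.insert (key x) (d.getD (key x) 0 + 1)) PySem.Dict.empty).getD m 0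
        = (LK.count m : Int) := by
    intro m
    have h2 := PySem.Dict.getD_foldl_insert_add_one (L.map key) PySem.Dict.empty m
    rw [List.foldl_map] at h2
    simpa [hLK] using h2
  have hlen : ∀ (l : List Int) (m : Int),
      (((maskedHistogram l mask).getD m []).length : Int) = ((l.map key).count m : Int) := by
    intro l m
    unfold maskedHistogram
    rw [hist_getD]
    simp only [PySem.Dict.getD_empty, List.nil_append]
    rw [← List.countP_eq_length_filter, List.count, List.countP_map]
    rfl
  set C := PySem.Set.inter (PySem.Set.ofList (maskedHistogram L mask).keys)
      (PySem.Set.ofList (maskedHistogram R mask).keys) with hC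
  have hCnodup : C.Nodup := PySem.Set.nodup_inter _ _ (PySem.Set.nodup_ofList _)
  have hCmem : ∀ m, m ∈ C ↔ m ∈ LK ∧ m ∈ RK := by
    intro m
    rw [hC, PySem.Set.mem_inter, hist_keys, hist_keys]
    simp [PySem.Set.mem_ofList, hLK, hRK, hkey]
  rw [PySem.List.foldl_add, PySem.List.foldl_add]
  simp only [zero_add]
  have hB : (R.map (fun r =>
      (L.foldl (fun d x => d.insert (key x) (d.getD (key x) 0 + 1)) PySem.Dict.empty).getD (key r) 0)).sum
      = ∑ m ∈ RK.toFinset, (RK.count m) • ((LK.count m : Int)) := by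
    have h1 : (R.map (fun r =>
        (L.foldl (fun d x => d.insert (key x) (d.getD (key x) 0 + 1)) PySem.Dict.empty).getD (key r) 0))
        = RK.map (fun m => (LK.count m : Int)) := by
      rw [hRK, List.map_map]
      exact List.map_congr_left (fun r _ => hcnt (key r))
    rw [h1, Finset.sum_list_map_count]
  have hA : (C.map (fun m => (((maskedHistogram L mask).getD m []).length : Int)
        * (((maskedHistogram R mask).getD m []).length : Int))).sum
      = ∑ m ∈ C.toFinset, (LK.count m : Int) * (RK.count m : Int) := by
    rw [← List.sum_toFinset _ hCnodup]
    apply Finset.sum_congr rfl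
    intro m _
    rw [hlen, hlen, ← hLK, ← hRK]
  rw [hA, hB]
  have hsub : C.toFinset ⊆ RK.toFinset := by
    intro m hm
    rw [List.mem_toFinset] at hm ⊢
    exact ((hCmem m).mp hm).2
  have hzero : ∀ m ∈ RK.toFinset, m ∉ C.toFinset → (LK.count m : Int) * (RK.count m : Int) = 0 := by
    intro m hmR hm
    rw [List.mem_toFinset] at hmR hm
    have hnL : m ∉ LK := fun h => hm ((hCmem m).mpr ⟨h, hmR⟩)
    simp [List.count_eq_zero_of_not_mem hnL]
  rw [Finset.sum_subset hsub hzero]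
  apply Finset.sum_congr rfl
  intro m _
  rw [nsmul_eq_mul]
  ring

-- ===== VERDICT (by name: the statement is the Claim_ definition above) =====
theorem NN_stats_spec : Claim_equal_NN_stats := by
  intro L R mask _ _
  unfold Spec_NN_stats
  simp only [NN_stats, NN_stats_alt, sums_eq L R mask]
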